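-- pv_equiv track=rewrite | github.com/Salome2010/IntroProgramacion | repaso.py | pos_umbral
-- ===== SOURCE A (Python) =====
-- def pos_umbral(s:[int], u:int) -> int:
--     contador:int = 0
--     for i in range(len(s)):
--         if s[i]>0:
--             contador+=s[i]
--             if contador> u:
--                 return i
--     return -1
-- ===== SOURCE B (Python) =====
-- def pos_umbral(s, u):
--     # Phase 1: build prefix table of running positive sums.
--     cum = []
--     t = 0
--     for x in s:
--         if x > 0:
--             t += x
--         cum.append(t)
--     # Phase 2: find the first prefix strictly above the (clamped) threshold.
--     th = u if u > 0 else 0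
--     for i, c in enumerate(cum):
--         if c > th:
--             return i
--     return -1
-- ===== Notes on version B (the rewrite author's own statement) =====
-- stated objective: alternative
-- what changed: B replaces A's fused accumulate-and-test index loop by two separate passes: it first builds the full prefix table of running positive sums, then searches it for the first entry above the threshold (clamped at 0, since a crossing can only happen at a positive element).
import Mathlib
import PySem

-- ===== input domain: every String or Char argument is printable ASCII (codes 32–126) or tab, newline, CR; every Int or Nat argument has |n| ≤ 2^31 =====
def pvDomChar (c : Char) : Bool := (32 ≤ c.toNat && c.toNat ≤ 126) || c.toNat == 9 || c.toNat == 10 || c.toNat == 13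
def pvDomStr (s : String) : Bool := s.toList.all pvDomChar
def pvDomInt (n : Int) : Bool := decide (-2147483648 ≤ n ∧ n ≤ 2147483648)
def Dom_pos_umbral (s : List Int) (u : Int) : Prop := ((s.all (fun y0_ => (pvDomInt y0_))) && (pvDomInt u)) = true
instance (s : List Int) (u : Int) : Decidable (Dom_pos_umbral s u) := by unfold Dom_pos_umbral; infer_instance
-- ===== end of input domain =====

-- B builds the prefix table of running positive sums, then searches it in a second pass; same O(n) cost, different decomposition.

-- ===== PORT A =====
-- the for-loop over range(len(s)) with early return, as structural recursion carrying (i, contador)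
def pos_umbral_go (l : List Int) (i contador u : Int) : Int :=
  match l with
  | [] => -1
  | x :: xs =>
    if x > 0 then
      (if contador + x > u then i else pos_umbral_go xs (i + 1) (contador + x) u)
    else pos_umbral_go xs (i + 1) contador u

def pos_umbral (s : List Int) (u : Int) : Int := pos_umbral_go s 0 0 u

-- ===== PORT B =====
-- phase 1: prefix table of running positive sums
def pv_accum (l : List Int) (t : Int) : List Int :=
  match l with
  | [] => []
  | x :: xs => (t + (if x > 0 then x else 0)) :: pv_accum xs (t + (if x > 0 then x else 0))

-- phase 2: first index whose table entry exceeds the threshold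
def pv_search (cs : List Int) (i th : Int) : Int :=
  match cs with
  | [] => -1
  | c :: rest => if c > th then i else pv_search rest (i + 1) th

def pos_umbral_alt (s : List Int) (u : Int) : Int :=
  pv_search (pv_accum s 0) 0 (if u > 0 then u else 0)

-- ===== PRECONDITION & SPEC =====
def Spec_pos_umbral (s : List Int) (u : Int) (out : Int) : Prop := out = pos_umbral_alt s u
instance (s : List Int) (u : Int) (out : Int) : Decidable (Spec_pos_umbral s u out) := by unfold Spec_pos_umbral; infer_instance

-- ===== CLAIM (what is proved, stated in full; the proofs are below) =====
def Claim_equal_pos_umbral : Prop := ∀ (s : List Int) (u : Int), Dom_pos_umbral s u → Spec_pos_umbral s u (pos_umbral s u)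

-- ===== LEMMAS AND PROOFS =====
lemma pos_umbral_key (l : List Int) (u : Int) :
    ∀ i c, 0 ≤ c → c ≤ (if u > 0 then u else 0) →
      pos_umbral_go l i c u = pv_search (pv_accum l c) i (if u > 0 then u else 0) := by
  induction l with
  | nil => intro i c _ _; simp [pos_umbral_go, pv_accum, pv_search]
  | cons x xs ih =>
    intro i c hc hth
    by_cases hx : x > 0
    · by_cases hcu : c + x > u
      · have h1 : c + x > (if u > 0 then u else 0) := by split_ifs <;> omega
        simp [pos_umbral_go, pv_accum, pv_search, hx, hcu, h1]
      · have h1 : ¬ (c + x > (if u > 0 then u else 0)) := by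
          split_ifs at * <;> omega
        have h2 : c + x ≤ (if u > 0 then u else 0) := by omega
        simp only [pos_umbral_go, pv_accum, pv_search, if_pos hx, if_neg hcu, if_neg h1]
        exact ih (i + 1) (c + x) (by omega) h2
    · have h1 : ¬ (c + 0 > (if u > 0 then u else 0)) := by omega
      simp only [pos_umbral_go, pv_accum, pv_search, if_neg hx, if_neg h1]
      rw [show c + 0 = c by ring]
      exact ih (i + 1) c hc hth

-- ===== VERDICT (by name: the statement is the Claim_ definition above) =====
theorem pos_umbral_spec : Claim_equal_pos_umbral := by
  intro s u _
  unfold Spec_pos_umbral pos_umbral pos_umbral_alt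
  exact pos_umbral_key s u 0 0 le_rfl (by split_ifs <;> omega)
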